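-- pv_equiv track=rewrite | github.com/mjenrungrot/autolab | src/autolab/plan_contract.py | _paths_overlap
-- ===== SOURCE A (Python) =====
-- from typing import Any
--
-- def _normalize_path(raw: Any) -> str:
--     text = str(raw or "").strip().replace("\\", "/")
--     while "//" in text:
--         text = text.replace("//", "/")
--     if text.startswith("./"):
--         text = text[2:]
--     return text.rstrip("/")
--
-- def _paths_overlap(paths_a: list[str], paths_b: list[str]) -> bool:
--     for raw_a in paths_a:
--         a = _normalize_path(raw_a)
--         if not a:
--             continue
--         for raw_b in paths_b:
--             b = _normalize_path(raw_b)
--             if not b: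
--                 continue
--             if a == b or a.startswith(b + "/") or b.startswith(a + "/"):
--                 return True
--     return False
-- ===== SOURCE B (Python) =====
-- def _normalize_path(raw):
--     text = str(raw or "").strip().replace("\\", "/")
--     while "//" in text:
--         text = text.replace("//", "/")
--     if text.startswith("./"):
--         text = text[2:]
--     return text.rstrip("/")
--
-- def _ancestors(path):
--     # the path itself and every prefix ending just before a '/'
--     return [path[:i] for i, ch in enumerate(path) if ch == '/'] + [path]
--
-- def _paths_overlap(paths_a: list, paths_b: list) -> bool:
--     norm_a = {p for p in map(_normalize_path, paths_a) if p}
--     norm_b = {p for p in map(_normalize_path, paths_b) if p}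
--     return any(anc in norm_a for b in norm_b for anc in _ancestors(b)) or \
--            any(anc in norm_b for a in norm_a for anc in _ancestors(a))
-- ===== Notes on version B (the rewrite author's own statement) =====
-- stated objective: alternative
-- what changed: Each path is normalized once into a per-side set and each normalized path's ancestor-prefix chain is looked up in the other side's set, replacing A's nested loop that re-normalizes every b-path for every a-path and compares whole strings pairwise.
import Mathlib
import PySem

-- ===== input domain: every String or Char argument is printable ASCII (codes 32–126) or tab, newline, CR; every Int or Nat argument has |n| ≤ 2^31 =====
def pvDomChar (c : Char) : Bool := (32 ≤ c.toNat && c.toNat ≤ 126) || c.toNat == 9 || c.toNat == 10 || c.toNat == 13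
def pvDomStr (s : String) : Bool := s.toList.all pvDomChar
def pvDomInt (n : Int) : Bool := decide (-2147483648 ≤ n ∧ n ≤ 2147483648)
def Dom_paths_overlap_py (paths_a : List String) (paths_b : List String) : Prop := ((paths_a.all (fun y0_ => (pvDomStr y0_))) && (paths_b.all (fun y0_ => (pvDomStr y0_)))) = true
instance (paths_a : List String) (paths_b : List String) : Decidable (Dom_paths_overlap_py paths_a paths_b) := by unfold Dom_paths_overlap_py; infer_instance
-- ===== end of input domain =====

-- B normalizes each path once into a per-side set and tests each path's ancestor-prefix
-- chain against the other side's set, replacing A's pairwise nested scan (alternative algorithm).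

-- ===== PORT A =====
-- shared helper: port of _normalize_path (identical in both Python sources)
-- 'while "//" in text' ported with fuel = length of text: each iteration shortens text by ≥ 1, so the fuel is never exhausted
def pvCollapse : Nat → String → String
  | 0, t => t
  | fuel + 1, t =>
      if PySem.Str.isIn "//" t then pvCollapse fuel (PySem.Str.replace t "//" "/") else t

def pvNorm (raw : String) : String :=
  -- str(raw or "") is raw itself for a str argument (an empty string stays empty)
  let t := PySem.Str.replace (PySem.Str.strip raw) "\\" "/"
  let t := pvCollapse t.toList.length t
  let t := if PySem.Str.startswith t "./" then PySem.Str.slice t (some 2) none else t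
  -- text.rstrip("/") ported by hand (PySem.Str.rstrip is whitespace-only): exact — drop trailing '/' chars
  String.ofList ((t.toList.reverse.dropWhile (fun c => c == '/')).reverse)

def paths_overlap_py (paths_a : List String) (paths_b : List String) : Bool :=
  paths_a.any (fun raw_a =>
    let a := pvNorm raw_a
    a != "" && paths_b.any (fun raw_b =>
      let b := pvNorm raw_b
      b != "" && (a == b || PySem.Str.startswith b (a ++ "/") || PySem.Str.startswith a (b ++ "/"))))

-- ===== PORT B =====
-- the path itself and every prefix ending just before a '/'
def pvAncestors (path : String) : List String :=
  ((PySem.List.enumerate path.toList).filter (fun ic => ic.2 == '/')).map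
      (fun ic => PySem.Str.slice path none (some ic.1)) ++ [path]

def paths_overlap_py_alt (paths_a : List String) (paths_b : List String) : Bool :=
  let norm_a := PySem.Set.ofList ((paths_a.map pvNorm).filter (fun p => p != ""))
  let norm_b := PySem.Set.ofList ((paths_b.map pvNorm).filter (fun p => p != ""))
  (norm_b.any (fun b => (pvAncestors b).any (fun anc => PySem.Set.contains norm_a anc)))
    || (norm_a.any (fun a => (pvAncestors a).any (fun anc => PySem.Set.contains norm_b anc)))

-- ===== PRECONDITION & SPEC =====
def Spec_paths_overlap_py (paths_a : List String) (paths_b : List String) (out : Bool) : Prop := out = paths_overlap_py_alt paths_a paths_b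
instance (paths_a : List String) (paths_b : List String) (out : Bool) : Decidable (Spec_paths_overlap_py paths_a paths_b out) := by unfold Spec_paths_overlap_py; infer_instance

-- ===== CLAIM (what is proved, stated in full; the proofs are below) =====
def Claim_equal_paths_overlap_py : Prop := ∀ (paths_a : List String) (paths_b : List String), Dom_paths_overlap_py paths_a paths_b → Spec_paths_overlap_py paths_a paths_b (paths_overlap_py paths_a paths_b)

-- ===== LEMMAS AND PROOFS =====

lemma slice_take (b : String) (k : Nat) :
    (PySem.Str.slice b none (some ((0:Int) + k))).toList = b.toList.take k := by
  simp [PySem.Str.toList_slice, PySem.Chars.slice_eq_listSlice, PySem.List.slice_to_natCast]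

-- a is in b's ancestor chain iff a = b or a ++ "/" is a prefix of b
lemma mem_pvAncestors (a b : String) :
    a ∈ pvAncestors b ↔ (a = b ∨ (a.toList ++ ['/']) <+: b.toList) := by
  simp only [pvAncestors, List.mem_append, List.mem_map, List.mem_filter,
    PySem.List.mem_enumerate_iff, List.mem_singleton]
  constructor
  · rintro (⟨ic, ⟨⟨k, hk, rfl⟩, hsl⟩, rfl⟩ | rfl)
    · right
      simp only [beq_iff_eq] at hsl
      rw [slice_take]
      refine ⟨b.toList.drop (k+1), ?_⟩
      rw [List.append_assoc, List.singleton_append, ← hsl,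
        List.getElem_cons_drop hk, List.take_append_drop]
    · exact Or.inl rfl
  · rintro (rfl | ⟨rest, hpre⟩)
    · exact Or.inr rfl
    · left
      set k := a.toList.length with hk
      have hlen : k < b.toList.length := by
        have := congrArg List.length hpre
        simp only [List.length_append, List.length_singleton] at this
        omega
      refine ⟨((0:Int)+k, b.toList[k]), ⟨⟨k, hlen, rfl⟩, ?_⟩, ?_⟩
      · simp only [beq_iff_eq]
        have hb : b.toList = a.toList ++ '/' :: rest := by
          rw [← hpre, List.append_assoc, List.singleton_append]
        rw [List.getElem_of_eq hb hlen]
        simp [hk]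
      · apply String.toList_inj.mp
        rw [slice_take, ← hpre, List.append_assoc, List.singleton_append, hk, List.take_left]

lemma startswith_slash_iff (a b : String) :
    PySem.Str.startswith b (a ++ "/") = true ↔ (a.toList ++ ['/']) <+: b.toList := by
  simp [PySem.Str.startswith, PySem.Chars.startswith_iff]

lemma contains_iff {s : PySem.Set String} {x : String} :
    PySem.Set.contains s x = true ↔ x ∈ s := by
  simp [PySem.Set.contains]

-- stated over an abstract normalizer f (instantiated with pvNorm below) so that
-- elaboration never needs to unfold pvNorm's body
lemma overlap_iff_gen (f : String → String) (pa pb : List String) :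
    (pa.any (fun raw_a =>
      let a := f raw_a
      a != "" && pb.any (fun raw_b =>
        let b := f raw_b
        b != "" && (a == b || PySem.Str.startswith b (a ++ "/") || PySem.Str.startswith a (b ++ "/"))))) = true ↔
      ∃ a ∈ (pa.map f).filter (fun p => p != ""),
      ∃ b ∈ (pb.map f).filter (fun p => p != ""),
        (a = b ∨ (a.toList ++ ['/']) <+: b.toList ∨ (b.toList ++ ['/']) <+: a.toList) := by
  simp only [List.any_eq_true, Bool.and_eq_true, Bool.or_eq_true,
    bne_iff_ne, ne_eq, beq_iff_eq, startswith_slash_iff, List.mem_filter, List.mem_map]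
  constructor
  · rintro ⟨ra, hra, hne, rb, hrb, hbne, hrel⟩
    exact ⟨f ra, ⟨⟨ra, hra, rfl⟩, by simpa using hne⟩,
           f rb, ⟨⟨rb, hrb, rfl⟩, by simpa using hbne⟩, by tauto⟩
  · rintro ⟨a, ⟨⟨ra, hra, rfl⟩, hne⟩, b, ⟨⟨rb, hrb, rfl⟩, hbne⟩, hrel⟩
    exact ⟨ra, hra, by simpa using hne, rb, hrb, by simpa using hbne, by tauto⟩

lemma overlap_iff (pa pb : List String) :
    paths_overlap_py pa pb = true ↔
      ∃ a ∈ (pa.map pvNorm).filter (fun p => p != ""),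
      ∃ b ∈ (pb.map pvNorm).filter (fun p => p != ""),
        (a = b ∨ (a.toList ++ ['/']) <+: b.toList ∨ (b.toList ++ ['/']) <+: a.toList) :=
  overlap_iff_gen pvNorm pa pb

lemma overlap_alt_iff (pa pb : List String) :
    paths_overlap_py_alt pa pb = true ↔
      ∃ a ∈ (pa.map pvNorm).filter (fun p => p != ""),
      ∃ b ∈ (pb.map pvNorm).filter (fun p => p != ""),
        (a = b ∨ (a.toList ++ ['/']) <+: b.toList ∨ (b.toList ++ ['/']) <+: a.toList) := by
  simp only [paths_overlap_py_alt, Bool.or_eq_true, List.any_eq_true, contains_iff,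
    PySem.Set.mem_ofList, mem_pvAncestors]
  constructor
  · rintro (⟨b, hb, anc, hanc, hmem⟩ | ⟨a, ha, anc, hanc, hmem⟩)
    · exact ⟨anc, hmem, b, hb, by tauto⟩
    · exact ⟨a, ha, anc, hmem, by tauto⟩
  · rintro ⟨a, ha, b, hb, (rfl | hpfx | hpfx)⟩
    · exact Or.inl ⟨a, hb, a, Or.inl rfl, ha⟩
    · exact Or.inl ⟨b, hb, a, Or.inr hpfx, ha⟩
    · exact Or.inr ⟨a, ha, b, Or.inr hpfx, hb⟩

-- ===== VERDICT (by name: the statement is the Claim_ definition above) =====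
theorem paths_overlap_py_spec : Claim_equal_paths_overlap_py := by
  intro pa pb _
  unfold Spec_paths_overlap_py
  rw [Bool.eq_iff_iff, overlap_iff, overlap_alt_iff]
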